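-- pv_equiv track=rewrite | github.com/kimgyuhee/Python | Chapter0_Algorithm/2305/230526/test01.py | solution
-- ===== SOURCE A (Python) =====
-- from collections import deque
-- from collections import deque
--
-- def solution(elements):
--     deque_e = deque(elements)
--     result = []
--     for i in range(len(elements)) :
--         for j in range(len(elements)) :
--             value = list(deque_e)[:j]
--             result.append(sum(value))
--
--         e = deque_e.popleft()
--         deque_e.append(e)
--
--     s = set(result)
--     return len(s)
-- ===== SOURCE B (Python) =====
-- def solution(elements):
--     n = len(elements)
--     doubled = elements + elements
--     vals = set()
--     for i in range(n):
--         t = 0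
--         for j in range(n):
--             vals.add(t)
--             t += doubled[i + j]
--     return len(vals)
-- ===== Notes on version B (the rewrite author's own statement) =====
-- stated objective: faster
-- what changed: Instead of rotating a deque and re-materialising and re-slicing it to sum a fresh prefix for every (i,j) pair, B walks the doubled list once per start index, extending each window sum by one element in O(1) and collecting the sums in a set incrementally.
import Mathlib
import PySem

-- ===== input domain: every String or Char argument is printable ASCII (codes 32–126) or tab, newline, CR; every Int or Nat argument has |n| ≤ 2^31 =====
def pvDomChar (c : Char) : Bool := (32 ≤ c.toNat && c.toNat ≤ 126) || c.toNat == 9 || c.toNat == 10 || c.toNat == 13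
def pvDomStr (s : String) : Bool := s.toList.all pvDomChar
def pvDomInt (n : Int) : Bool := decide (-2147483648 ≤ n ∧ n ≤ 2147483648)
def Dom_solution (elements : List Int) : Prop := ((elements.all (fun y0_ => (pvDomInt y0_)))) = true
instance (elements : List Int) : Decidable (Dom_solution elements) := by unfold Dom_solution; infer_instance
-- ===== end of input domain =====

-- B replaces A's rotate-and-reslice scan (sum over a fresh slice per pair i,j) by incremental window sums over the doubled list; same return value.

-- ===== PORT A =====
-- e = deque_e.popleft(); deque_e.append(e)  (popleft is only reached on a nonempty deque)
def dequeRotate (xs : List Int) : List Int :=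
  match xs with
  | [] => []
  | e :: rest => rest ++ [e]

def solution (elements : List Int) : Int :=
  let st := (PySem.List.pyRange 0 (elements.length : Int) 1).foldl
    (fun (st : List Int × List Int) _i =>
      let result := (PySem.List.pyRange 0 (elements.length : Int) 1).foldl
        (fun res j => res ++ [(PySem.List.slice st.1 none (some j)).sum]) st.2
      (dequeRotate st.1, result))
    (elements, [])
  PySem.Set.len (PySem.Set.ofList st.2)

-- ===== PORT B =====
def solution_alt (elements : List Int) : Int :=
  let n := elements.length
  let doubled := elements ++ elements
  let vals := (PySem.List.pyRange 0 (n : Int) 1).foldl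
    (fun (vals : PySem.Set Int) i =>
      ((PySem.List.pyRange 0 (n : Int) 1).foldl
        (fun (p : PySem.Set Int × Int) j =>
          (PySem.Set.add p.1 p.2, p.2 + PySem.List.pyGetD doubled (i + j) 0))
        (vals, 0)).1)
    PySem.Set.empty
  PySem.Set.len vals

-- ===== PRECONDITION & SPEC =====
def Spec_solution (elements : List Int) (out : Int) : Prop := out = solution_alt elements
instance (elements : List Int) (out : Int) : Decidable (Spec_solution elements out) := by unfold Spec_solution; infer_instance

-- ===== CLAIM (what is proved, stated in full; the proofs are below) =====
def Claim_equal_solution : Prop := ∀ (elements : List Int), Dom_solution elements → Spec_solution elements (solution elements)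

-- ===== LEMMAS AND PROOFS =====

-- the deque after i outer iterations
def rotN (l : List Int) (i : Nat) : List Int := l.drop i ++ l.take i

-- sum of the length-j window of l++l starting at i
def win (l : List Int) (i j : Nat) : Int := (((l ++ l).drop i).take j).sum

-- the flattened list of all window sums, rows s..s+m-1
def rows (l : List Int) (s m : Nat) : List Int :=
  (List.range' s m).flatMap (fun i => (List.range' 0 l.length).map (fun j => win l i j))

theorem rotN_zero (l : List Int) : rotN l 0 = l := by simp [rotN]

theorem dequeRotate_rotN (l : List Int) (i : Nat) (hi : i < l.length) :
    dequeRotate (rotN l i) = rotN l (i + 1) := by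
  have hd : l.drop i = l[i] :: l.drop (i + 1) := List.drop_eq_getElem_cons hi
  have ht : l.take (i + 1) = l.take i ++ [l[i]] := by
    rw [List.take_add_one]
    simp [List.getElem?_eq_getElem hi]
  simp only [rotN, hd, ht, List.cons_append, dequeRotate, List.append_assoc]

theorem take_rotN_eq (l : List Int) (i j : Nat) (hi : i ≤ l.length) (hj : j ≤ l.length) :
    (rotN l i).take j = ((l ++ l).drop i).take j := by
  unfold rotN
  rw [List.drop_append, Nat.sub_eq_zero_of_le hi, List.drop_zero,
    List.take_append, List.take_append, List.take_take]
  have hlen : (List.drop i l).length = l.length - i := by simp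
  rw [hlen, Nat.min_eq_left (by omega)]

theorem win_succ (l : List Int) (i j : Nat) (h : i + j < l.length + l.length) :
    win l i (j + 1) = win l i j + PySem.List.pyGetD (l ++ l) ((i : Int) + (j : Int)) 0 := by
  have hcast : ((i : Int) + (j : Int)) = ((i + j : Nat) : Int) := by push_cast; ring
  have hj : j < ((l ++ l).drop i).length := by simp; omega
  rw [hcast, PySem.List.pyGetD_natCast]
  have htake : ((l ++ l).drop i).take (j + 1) = ((l ++ l).drop i).take j ++ [((l ++ l).drop i)[j]] := by
    rw [List.take_add_one]
    simp [List.getElem?_eq_getElem hj]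
  have hget : ((l ++ l).drop i)[j] = (l ++ l).getD (i + j) 0 := by
    rw [List.getElem_drop]
    exact (List.getD_eq_getElem _ _ (by simp; omega)).symm
  rw [win, htake, hget, List.sum_append, List.sum_cons, List.sum_nil, add_zero, win]

theorem outerA (l : List Int) (m s : Nat) (hs : s + m ≤ l.length) (res : List Int) :
    (List.range' s m).foldl
        (fun (st : List Int × List Int) (_i : Nat) =>
          (dequeRotate st.1,
            (List.range' 0 l.length).foldl
              (fun r (k : Nat) => r ++ [(st.1.take k).sum]) st.2))
        (rotN l s, res)
      = (rotN l (s + m), res ++ rows l s m) := by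
  induction m generalizing s res with
  | zero => simp [rows]
  | succ m ih =>
    simp only [List.range'_succ, List.foldl_cons]
    rw [PySem.List.foldl_append_singleton_eq_map (fun k => ((rotN l s).take k).sum),
      dequeRotate_rotN l s (by omega)]
    have hrow : (List.range' 0 l.length).map (fun j => ((rotN l s).take j).sum)
        = (List.range' 0 l.length).map (fun j => win l s j) := by
      apply List.map_congr_left
      intro j hj
      have hjlt : j < l.length := by
        have := List.mem_range'_1.mp hj
        omega
      rw [take_rotN_eq l s j (by omega) (le_of_lt hjlt), win]
    rw [hrow, ih (s + 1) (by omega)]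
    simp only [Prod.mk.injEq]
    refine ⟨by congr 1; omega, ?_⟩
    simp only [rows, List.range'_succ, List.flatMap_cons, List.append_assoc]

theorem innerB (l : List Int) (i : Nat) (hi : i < l.length) (m s : Nat) (hsm : s + m ≤ l.length)
    (v : PySem.Set Int) :
    (List.range' s m).foldl
        (fun (p : PySem.Set Int × Int) (k : Nat) =>
          (PySem.Set.add p.1 p.2, p.2 + PySem.List.pyGetD (l ++ l) ((i : Int) + (k : Int)) 0))
        (v, win l i s)
      = (((List.range' s m).map (fun j => win l i j)).foldl PySem.Set.add v, win l i (s + m)) := by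
  induction m generalizing s v with
  | zero => simp
  | succ m ih =>
    rw [List.range'_succ, List.foldl_cons]
    rw [← win_succ l i s (by omega)]
    rw [ih (s + 1) (by omega)]
    simp only [List.map_cons, List.foldl_cons, Prod.mk.injEq]
    exact ⟨trivial, by congr 1; omega⟩

theorem outerB (l : List Int) (m s : Nat) (hs : s + m ≤ l.length) (v : PySem.Set Int) :
    (List.range' s m).foldl
        (fun (vals : PySem.Set Int) (i : Nat) =>
          ((List.range' 0 l.length).foldl
            (fun (p : PySem.Set Int × Int) (k : Nat) =>
              (PySem.Set.add p.1 p.2, p.2 + PySem.List.pyGetD (l ++ l) ((i : Int) + (k : Int)) 0))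
            (vals, 0)).1)
        v
      = (rows l s m).foldl PySem.Set.add v := by
  induction m generalizing s v with
  | zero => simp [rows]
  | succ m ih =>
    simp only [List.range'_succ, List.foldl_cons]
    have hinner :
        ((List.range' 0 l.length).foldl
            (fun (p : PySem.Set Int × Int) (k : Nat) =>
              (PySem.Set.add p.1 p.2, p.2 + PySem.List.pyGetD (l ++ l) ((s : Int) + (k : Int)) 0))
            (v, 0)).1
          = ((List.range' 0 l.length).map (fun j => win l s j)).foldl PySem.Set.add v := by
      have h0 : win l s 0 = 0 := by simp [win]
      have h := innerB l s (by omega) l.length 0 (by omega) v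
      rw [h0] at h
      rw [h]
    rw [hinner, ih (s + 1) (by omega)]
    simp only [rows, List.range'_succ, List.flatMap_cons, List.foldl_append]

-- ===== VERDICT (by name: the statement is the Claim_ definition above) =====
theorem solution_spec : Claim_equal_solution := by
  intro l _
  show solution l = solution_alt l
  simp only [solution, solution_alt, PySem.List.pyRange_zero_nat, List.foldl_map,
    PySem.List.slice_to_natCast, List.range_eq_range']
  have hA := outerA l l.length 0 (by omega) []
  rw [rotN_zero] at hA
  rw [hA, outerB l l.length 0 (by omega) PySem.Set.empty]
  simp only [List.nil_append]
  rw [PySem.Set.ofList_eq_foldl]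
  rfl
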